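-- pv_equiv track=rewrite | github.com/aniltrue/PingPongGNN | venv/GAME/Player.py | old2New
-- ===== SOURCE A (Python) =====
-- def old2New(action: list) -> list:
--     return_action = [0 for i in range(9)]
--
--     if action == [0, 0, 1, 1, 0, 0]:
--         return_action[0] = 1
--     elif action == [0, 1, 0, 1, 0, 0]:
--         return_action[1] = 1
--     elif action == [1, 0, 0, 1, 0, 0]:
--         return_action[2] = 1
--     elif action == [0, 0, 1, 0, 1, 0]:
--         return_action[3] = 1
--     elif action == [0, 1, 0, 0, 1, 0]:
--         return_action[4] = 1
--     elif action == [1, 0, 0, 0, 1, 0]: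
--         return_action[5] = 1
--     elif action == [0, 0, 1, 0, 0, 1]:
--         return_action[6] = 1
--     elif action == [0, 1, 0, 0, 0, 1]:
--         return_action[7] = 1
--     elif action == [1, 0, 0, 0, 0, 1]:
--         return_action[8] = 1
--
--     return return_action
-- ===== SOURCE B (Python) =====
-- def old2New(action: list) -> list:
--     # The nine valid patterns are exactly: length 6, entries 0/1, with exactly
--     # one 1 among the first three entries and exactly one 1 among the last three.
--     # The output index decodes arithmetically from the positions of the two 1s:
--     # idx = 3*(action[4] + 2*action[5]) + 2*action[0] + action[1].
--     out = [0] * 9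
--     if (len(action) == 6 and all(v in (0, 1) for v in action)
--             and sum(action[:3]) == 1 and sum(action[3:]) == 1):
--         out[3 * (action[4] + 2 * action[5]) + 2 * action[0] + action[1]] = 1
--     return out
-- ===== Notes on version B (the rewrite author's own statement) =====
-- stated objective: alternative
-- what changed: Replaces the nine explicit list-equality branches by an arithmetic decoder: it checks the structural shape shared by all valid patterns (length 6, 0/1 entries, one 1 per half) and computes the one-hot index by a closed-form formula 3*(action[4]+2*action[5])+2*action[0]+action[1], with no pattern table or equality chain at all.
import Mathlib
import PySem

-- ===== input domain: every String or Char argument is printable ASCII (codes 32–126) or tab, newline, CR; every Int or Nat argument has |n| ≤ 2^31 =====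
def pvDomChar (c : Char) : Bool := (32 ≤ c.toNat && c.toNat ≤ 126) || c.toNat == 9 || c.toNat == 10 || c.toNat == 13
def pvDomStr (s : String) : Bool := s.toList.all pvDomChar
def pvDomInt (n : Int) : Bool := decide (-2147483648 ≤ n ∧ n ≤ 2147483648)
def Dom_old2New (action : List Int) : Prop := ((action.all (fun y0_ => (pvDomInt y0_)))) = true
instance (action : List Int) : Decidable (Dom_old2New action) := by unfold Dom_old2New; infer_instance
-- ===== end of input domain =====

-- B replaces A's nine-branch equality chain by a shape check plus a closed-form arithmetic decode of the one-hot index (alternative algorithm).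


-- ===== PORT A =====
def old2New (action : List Int) : List Int :=
  let return_action : List Int := (PySem.List.pyRange 0 9 1).map (fun _ => 0)
  if action = [0, 0, 1, 1, 0, 0] then return_action.set 0 1
  else if action = [0, 1, 0, 1, 0, 0] then return_action.set 1 1
  else if action = [1, 0, 0, 1, 0, 0] then return_action.set 2 1
  else if action = [0, 0, 1, 0, 1, 0] then return_action.set 3 1
  else if action = [0, 1, 0, 0, 1, 0] then return_action.set 4 1
  else if action = [1, 0, 0, 0, 1, 0] then return_action.set 5 1
  else if action = [0, 0, 1, 0, 0, 1] then return_action.set 6 1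
  else if action = [0, 1, 0, 0, 0, 1] then return_action.set 7 1
  else if action = [1, 0, 0, 0, 0, 1] then return_action.set 8 1
  else return_action

-- ===== PORT B =====
-- transliteration of Source B: shape guard, then out[idx] = 1 with the arithmetic idx.
-- action[k] is ported as (PySem.List.pyGet? action k).getD 0 — the guard guarantees length 6,
-- so the default is never taken (totalization only); under the guard idx ∈ [0,8], so .toNat is exact.
def old2New_alt (action : List Int) : List Int :=
  let out : List Int := List.replicate 9 0
  if action.length = 6 ∧ action.all (fun v => v == 0 || v == 1)
      ∧ (PySem.List.slice action none (some 3)).sum = 1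
      ∧ (PySem.List.slice action (some 3) none).sum = 1 then
    let idx : Int := 3 * ((PySem.List.pyGet? action 4).getD 0 + 2 * (PySem.List.pyGet? action 5).getD 0)
                     + 2 * (PySem.List.pyGet? action 0).getD 0 + (PySem.List.pyGet? action 1).getD 0
    out.set idx.toNat 1
  else out

-- ===== PRECONDITION & SPEC =====
def Spec_old2New (action : List Int) (out : List Int) : Prop := out = old2New_alt action
instance (action : List Int) (out : List Int) : Decidable (Spec_old2New action out) := by unfold Spec_old2New; infer_instance

-- ===== CLAIM (what is proved, stated in full; the proofs are below) =====
def Claim_equal_old2New : Prop := ∀ (action : List Int), Dom_old2New action → Spec_old2New action (old2New action)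

-- ===== LEMMAS AND PROOFS =====

-- B's guard holds exactly on the nine patterns A's chain recognizes.
set_option maxHeartbeats 1000000 in
lemma guard_chars (action : List Int)
    (h : action.length = 6 ∧ action.all (fun v => v == 0 || v == 1)
      ∧ (PySem.List.slice action none (some 3)).sum = 1
      ∧ (PySem.List.slice action (some 3) none).sum = 1) :
    action = [0, 0, 1, 1, 0, 0] ∨ action = [0, 1, 0, 1, 0, 0] ∨ action = [1, 0, 0, 1, 0, 0] ∨
    action = [0, 0, 1, 0, 1, 0] ∨ action = [0, 1, 0, 0, 1, 0] ∨ action = [1, 0, 0, 0, 1, 0] ∨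
    action = [0, 0, 1, 0, 0, 1] ∨ action = [0, 1, 0, 0, 0, 1] ∨ action = [1, 0, 0, 0, 0, 1] := by
  obtain ⟨h6, hall, hs1, hs2⟩ := h
  match action, h6 with
  | [a, b, c, d, e, f], _ =>
    simp [List.all] at hall
    simp [PySem.List.slice] at hs1 hs2
    obtain ⟨ha, hb, hc, hd, he, hf⟩ := hall
    rcases ha with rfl | rfl <;> rcases hb with rfl | rfl <;> rcases hc with rfl | rfl <;>
      rcases hd with rfl | rfl <;> rcases he with rfl | rfl <;> rcases hf with rfl | rfl <;>
      first | omega | decide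

-- ===== VERDICT (by name: the statement is the Claim_ definition above) =====
theorem old2New_spec : Claim_equal_old2New := by
  intro action _
  unfold Spec_old2New
  by_cases hg : action.length = 6 ∧ action.all (fun v => v == 0 || v == 1)
      ∧ (PySem.List.slice action none (some 3)).sum = 1
      ∧ (PySem.List.slice action (some 3) none).sum = 1
  · rcases guard_chars action hg with rfl|rfl|rfl|rfl|rfl|rfl|rfl|rfl|rfl <;> decide
  · unfold old2New old2New_alt
    rw [if_neg hg]
    split_ifs with h1 h2 h3 h4 h5 h6 h7 h8 h9
    · exact absurd (by subst h1; decide) hg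
    · exact absurd (by subst h2; decide) hg
    · exact absurd (by subst h3; decide) hg
    · exact absurd (by subst h4; decide) hg
    · exact absurd (by subst h5; decide) hg
    · exact absurd (by subst h6; decide) hg
    · exact absurd (by subst h7; decide) hg
    · exact absurd (by subst h8; decide) hg
    · exact absurd (by subst h9; decide) hg
    · rfl
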